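-- pv_equiv track=rewrite | github.com/radiocosmology/caput | caput/memh5.py | format_abs_path
-- ===== SOURCE A (Python) =====
-- import posixpath
--
-- def format_abs_path(path):
--     """Return absolute path string, formated without any extra '/'s."""
--     if not posixpath.isabs(path):
--         raise ValueError("Absolute path must be provided.")
--
--     path_parts = path.split("/")
--     # Strip out any empty key parts.  Takes care of '//', trailing '/', and
--     # removes leading '/'.
--     path_parts = [p for p in path_parts if p]
--
--     out = "/"
--     for p in path_parts:
--         out = posixpath.join(out, p)
--     return out
-- ===== SOURCE B (Python) =====
-- def format_abs_path(path):
--     """Return absolute path string, formated without any extra '/'s."""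
--     if not path.startswith("/"):
--         raise ValueError("Absolute path must be provided.")
--     out = ""
--     for ch in path:
--         if ch != "/" or not out.endswith("/"):
--             out += ch
--     if len(out) > 1 and out.endswith("/"):
--         out = out[:-1]
--     return out
-- ===== Notes on version B (the rewrite author's own statement) =====
-- stated objective: alternative
-- what changed: Replaced A's split-into-parts, filter-empties and posixpath.join rebuild loop by a single left-to-right character scan that drops each slash immediately following another slash, then removes one trailing slash when the result has more than one character.
import Mathlib
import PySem

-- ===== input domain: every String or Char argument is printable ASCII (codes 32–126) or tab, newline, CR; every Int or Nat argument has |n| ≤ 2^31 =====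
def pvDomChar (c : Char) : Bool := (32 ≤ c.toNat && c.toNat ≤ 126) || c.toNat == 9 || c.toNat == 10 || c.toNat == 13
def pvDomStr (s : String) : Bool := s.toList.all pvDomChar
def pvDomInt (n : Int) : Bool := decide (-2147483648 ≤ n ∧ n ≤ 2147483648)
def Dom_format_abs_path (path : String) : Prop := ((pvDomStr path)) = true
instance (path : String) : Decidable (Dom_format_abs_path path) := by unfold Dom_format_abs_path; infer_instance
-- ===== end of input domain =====

-- B replaces A's split/filter/join-loop pipeline by a single left-to-right scan that copies each
-- character unless it is a '/' following a '/', then strips one trailing '/'; objective: alternative.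
-- Pre_ excludes exactly the non-absolute paths, on which both A and B raise ValueError.

-- ===== PORT A =====
-- posixpath.join for two arguments, ported step for step (sep = '/'):
-- if b starts with '/', b replaces the path; else append b, inserting '/' unless a is '' or ends with '/'.
def pvPosixJoin (a b : List Char) : List Char :=
  if PySem.Chars.startswith b ['/'] then b
  else if a = [] ∨ PySem.Chars.endswith a ['/'] = true then a ++ b
  else a ++ '/' :: b

def format_abs_path (path : String) : String :=
  -- (outside Pre_, where the Python raises ValueError, the port just computes the same body)
  let path_parts := PySem.Chars.splitOn path.toList ['/']
  let path_parts := path_parts.filter (fun p => p ≠ [])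
  String.mk (path_parts.foldl pvPosixJoin ['/'])

-- ===== PORT B =====
-- one step of Source B's loop: append ch unless ch == '/' and out already ends with '/'
def pvStepB (acc : List Char) (c : Char) : List Char :=
  if c ≠ '/' ∨ ¬ (PySem.Chars.endswith acc ['/'] = true) then acc ++ [c] else acc

def format_abs_path_alt (path : String) : String :=
  let out := path.toList.foldl pvStepB []
  -- out[:-1] on a list of length > 1 is dropLast (exact: Python's s[:-1] drops the last character)
  String.mk (if 1 < out.length ∧ PySem.Chars.endswith out ['/'] = true then out.dropLast else out)

-- ===== PRECONDITION & SPEC =====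
-- Pre_: posixpath.isabs(path), i.e. path starts with '/'；on all other inputs A (and B) raise ValueError.
def Pre_format_abs_path (path : String) : Prop := PySem.Str.startswith path "/" = true
instance (path : String) : Decidable (Pre_format_abs_path path) := by unfold Pre_format_abs_path; infer_instance

def pvWitness_format_abs_path : String := "/a//b/"

def Spec_format_abs_path (path : String) (out : String) : Prop := out = format_abs_path_alt path
instance (path : String) (out : String) : Decidable (Spec_format_abs_path path out) := by unfold Spec_format_abs_path; infer_instance

-- ===== CLAIM (what is proved, stated in full; the proofs are below) =====
def Claim_equal_format_abs_path : Prop := ∀ (path : String), Dom_format_abs_path path → Pre_format_abs_path path → Spec_format_abs_path path (format_abs_path path)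

-- ===== LEMMAS AND PROOFS =====

-- keep only the nonempty pieces
def pvFl (ts : List (List Char)) : List (List Char) := ts.filter (fun p => p ≠ [])
-- the nonempty pieces of cs split on '/'
def pvF (cs : List Char) : List (List Char) := pvFl (cs.splitOn '/')
-- each piece preceded by one '/'
def pvJ (ps : List (List Char)) : List Char := (ps.map (fun p => '/' :: p)).flatten
-- pieces joined by single '/', no leading one
def pvTailJ : List (List Char) → List Char
  | [] => []
  | p :: t => p ++ pvJ t
-- Source B's scan, written top-down; the Bool records whether the previous kept char was '/'
def pvCollA : Bool → List Char → List Char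
  | _, [] => []
  | b, c :: cs => if c = '/' then (if b then pvCollA true cs else '/' :: pvCollA true cs) else c :: pvCollA false cs

theorem pvJ_nil : pvJ [] = [] := rfl
theorem pvJ_cons (p : List Char) (t : List (List Char)) : pvJ (p :: t) = '/' :: (p ++ pvJ t) := by
  simp [pvJ]
theorem pvTailJ_nil : pvTailJ [] = [] := rfl
theorem pvTailJ_cons (p : List Char) (t : List (List Char)) : pvTailJ (p :: t) = p ++ pvJ t := rfl
theorem pvFl_nil_cons (tt : List (List Char)) : pvFl ([] :: tt) = pvFl tt := by simp [pvFl]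
theorem pvFl_cons {p : List Char} (tt : List (List Char)) (h : p ≠ []) : pvFl (p :: tt) = p :: pvFl tt := by
  simp [pvFl, h]

theorem pv_splitOn_nil : List.splitOn '/' ([] : List Char) = [[]] := rfl
theorem pv_splitOn_cons_slash (l : List Char) : List.splitOn '/' ('/' :: l) = [] :: List.splitOn '/' l := by
  simp [List.splitOn, List.splitOnP_cons]
theorem pv_splitOn_cons {c : Char} (l : List Char) (hc : c ≠ '/') :
    List.splitOn '/' (c :: l) = List.modifyHead (List.cons c) (List.splitOn '/' l) := by
  simp [List.splitOn, List.splitOnP_cons, hc]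
theorem pv_splitOn_exists (l : List Char) : ∃ hh tt, List.splitOn '/' l = hh :: tt := by
  rcases hx : List.splitOn '/' l with _ | ⟨hh, tt⟩
  · exact absurd hx (List.splitOnP_ne_nil _ _)
  · exact ⟨hh, tt, rfl⟩

theorem pv_endswith_slash (l : List Char) : PySem.Chars.endswith l ['/'] = true ↔ l.getLast? = some '/' := by
  rw [PySem.Chars.endswith_iff]
  constructor
  · rintro ⟨t, rfl⟩; simp
  · intro h
    rcases l.eq_nil_or_concat with rfl | ⟨L, b, rfl⟩
    · simp at h
    · simp at h
      exact ⟨L, by simp [h]⟩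

theorem pv_last_ne_slash {p : List Char} (hne : p ≠ []) (hns : '/' ∉ p) : p.getLast? ≠ some '/' := by
  intro h
  rcases p.eq_nil_or_concat with rfl | ⟨L, b, rfl⟩
  · simp at h
  · simp at h
    exact hns (by simp [h])

theorem pv_splitOn_go (fuel : Nat) : ∀ (l cur : List Char) (acc : List (List Char)), l.length < fuel →
    PySem.Chars.splitOn.go ['/'] fuel l cur acc
      = acc.reverse ++ List.modifyHead (fun h => cur.reverse ++ h) (List.splitOn '/' l) := by
  induction fuel with
  | zero => intro l cur acc h; omega
  | succ n ih =>
    intro l cur acc h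
    cases l with
    | nil => simp [PySem.Chars.splitOn.go]
    | cons c rest =>
      by_cases hc : c = '/'
      · subst hc
        have hgo : PySem.Chars.splitOn.go ['/'] (n+1) ('/' :: rest) cur acc
            = PySem.Chars.splitOn.go ['/'] n rest [] (cur.reverse :: acc) := by
          simp [PySem.Chars.splitOn.go, List.isPrefixOf]
        rw [hgo, ih rest [] (cur.reverse :: acc) (by simpa using Nat.lt_of_succ_lt_succ h)]
        obtain ⟨hh, tt, hst⟩ := pv_splitOn_exists rest
        rw [pv_splitOn_cons_slash, hst]
        simp [List.modifyHead]
      · have hgo : PySem.Chars.splitOn.go ['/'] (n+1) (c :: rest) cur acc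
            = PySem.Chars.splitOn.go ['/'] n rest (c :: cur) acc := by
          simp [PySem.Chars.splitOn.go, List.isPrefixOf, Ne.symm hc]
        rw [hgo, ih rest (c :: cur) acc (by simpa using Nat.lt_of_succ_lt_succ h)]
        obtain ⟨hh, tt, hst⟩ := pv_splitOn_exists rest
        rw [pv_splitOn_cons _ hc, hst]
        simp [List.modifyHead]

theorem pv_splitOn_eq (cs : List Char) : PySem.Chars.splitOn cs ['/'] = List.splitOn '/' cs := by
  have h := pv_splitOn_go (cs.length + 1) cs [] [] (by omega)
  obtain ⟨hh, tt, hst⟩ := pv_splitOn_exists cs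
  rw [hst] at h ⊢
  simpa [PySem.Chars.splitOn, List.modifyHead] using h

theorem pv_parts_noslash (cs : List Char) : ∀ p ∈ List.splitOn '/' cs, '/' ∉ p := by
  induction cs with
  | nil =>
    intro p hp
    rw [pv_splitOn_nil] at hp
    simp at hp
    simp [hp]
  | cons c rest ih =>
    intro p hp
    by_cases hc : c = '/'
    · subst hc
      rw [pv_splitOn_cons_slash] at hp
      rcases List.mem_cons.mp hp with rfl | hp
      · simp
      · exact ih p hp
    · obtain ⟨hh, tt, hst⟩ := pv_splitOn_exists rest
      rw [pv_splitOn_cons _ hc, hst] at hp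
      have hmh : List.modifyHead (List.cons c) (hh :: tt) = (c :: hh) :: tt := rfl
      rw [hmh] at hp
      rcases List.mem_cons.mp hp with rfl | hp
      · intro hm
        rcases List.mem_cons.mp hm with h1 | h2
        · exact hc h1.symm
        · exact ih hh (by rw [hst]; exact List.mem_cons_self) h2
      · exact ih p (by rw [hst]; exact List.mem_cons_of_mem _ hp)

theorem pv_good (cs : List Char) : ∀ p ∈ pvF cs, p ≠ [] ∧ '/' ∉ p := by
  intro p hp
  have hmem : p ∈ List.splitOn '/' cs := List.mem_of_mem_filter hp
  have hne : p ≠ [] := by simpa using List.of_mem_filter hp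
  exact ⟨hne, pv_parts_noslash cs p hmem⟩

theorem pv_allslash (cs : List Char) (h : pvF cs = []) : ∀ c ∈ cs, c = '/' := by
  induction cs with
  | nil => simp
  | cons c rest ih =>
    by_cases hc : c = '/'
    · subst hc
      have h2 : pvF rest = [] := by
        have := h
        unfold pvF at this ⊢
        rwa [pv_splitOn_cons_slash, pvFl_nil_cons] at this
      intro d hd
      rcases List.mem_cons.mp hd with rfl | hd
      · rfl
      · exact ih h2 d hd
    · exfalso
      obtain ⟨hh, tt, hst⟩ := pv_splitOn_exists rest
      unfold pvF at h
      rw [pv_splitOn_cons _ hc, hst] at h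
      have hmh : List.modifyHead (List.cons c) (hh :: tt) = (c :: hh) :: tt := rfl
      rw [hmh, pvFl_cons _ (by simp)] at h
      exact List.cons_ne_nil _ _ h

theorem pv_allslash_last (cs : List Char) (h : pvF cs = []) (hne : cs ≠ []) : cs.getLast? = some '/' := by
  rcases cs.eq_nil_or_concat with rfl | ⟨L, b, rfl⟩
  · exact absurd rfl hne
  · have : b = '/' := pv_allslash _ h b (by simp)
    simp [this]

theorem pv_foldB (cs : List Char) : ∀ acc : List Char,
    cs.foldl pvStepB acc = acc ++ pvCollA (acc.getLast? == some '/') cs := by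
  induction cs with
  | nil => intro acc; simp [pvCollA]
  | cons c rest ih =>
    intro acc
    by_cases hc : c = '/'
    · subst hc
      by_cases hb : acc.getLast? = some '/'
      · have hs : pvStepB acc '/' = acc := by
          simp [pvStepB, pv_endswith_slash, hb]
        rw [List.foldl_cons, hs, ih acc]
        simp [pvCollA, hb]
      · have hs : pvStepB acc '/' = acc ++ ['/'] := by
          simp [pvStepB, pv_endswith_slash, hb]
        rw [List.foldl_cons, hs, ih (acc ++ ['/'])]
        simp [pvCollA, hb, List.getLast?_append]
    · have hs : pvStepB acc c = acc ++ [c] := by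
        simp [pvStepB, hc]
      rw [List.foldl_cons, hs, ih (acc ++ [c])]
      have hcb : (c == '/') = false := by simp [hc]
      simp [List.getLast?_append, hcb, pvCollA, hc]

theorem pv_QR (cs : List Char) :
    (pvCollA true cs = pvTailJ (pvF cs) ++ (if cs.getLast? = some '/' ∧ pvF cs ≠ [] then ['/'] else []))
    ∧ (pvCollA false cs = (List.splitOn '/' cs).headI ++ pvJ (pvFl ((List.splitOn '/' cs).tail))
        ++ (if cs.getLast? = some '/' then ['/'] else [])) := by
  induction cs with
  | nil => constructor <;> decide
  | cons c rest ih =>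
    obtain ⟨ihT, ihF⟩ := ih
    by_cases hc : c = '/'
    · subst hc
      have hF : pvF ('/' :: rest) = pvF rest := by
        unfold pvF
        rw [pv_splitOn_cons_slash, pvFl_nil_cons]
      constructor
      · -- Q, leading '/'
        cases rest with
        | nil => decide
        | cons d ds =>
          have hcol : pvCollA true ('/' :: d :: ds) = pvCollA true (d :: ds) := by simp [pvCollA]
          rw [hcol, hF, List.getLast?_cons_cons]
          exact ihT
      · -- R, leading '/'
        have hL : pvCollA false ('/' :: rest) = '/' :: pvCollA true rest := by simp [pvCollA]
        rw [hL, ihT, pv_splitOn_cons_slash, List.headI_cons, List.tail_cons]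
        have hFl : pvFl (List.splitOn '/' rest) = pvF rest := rfl
        rw [hFl]
        by_cases hFe : pvF rest = []
        · have hlast : ('/' :: rest).getLast? = some '/' := by
            cases rest with
            | nil => rfl
            | cons d ds =>
              rw [List.getLast?_cons_cons]
              exact pv_allslash_last _ hFe (by simp)
          rw [hFe, pvTailJ_nil, pvJ_nil, if_neg (by simp), if_pos hlast]
          rfl
        · obtain ⟨p, t, hpt⟩ : ∃ p t, pvF rest = p :: t := by
            rcases hx : pvF rest with _ | ⟨p, t⟩
            · exact absurd hx hFe
            · exact ⟨p, t, rfl⟩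
          have hrne : rest ≠ [] := by
            rintro rfl
            rw [show pvF [] = [] from rfl] at hpt
            exact List.cons_ne_nil _ _ hpt.symm
          have hlast2 : ('/' :: rest).getLast? = rest.getLast? := by
            cases rest with
            | nil => exact absurd rfl hrne
            | cons d ds => rw [List.getLast?_cons_cons]
          rw [hlast2, hpt, pvTailJ_cons, pvJ_cons]
          by_cases hl : rest.getLast? = some '/'
          · rw [if_pos ⟨hl, by simp⟩, if_pos hl]
            simp
          · rw [if_neg (by simp [hl]), if_neg hl]
            simp
    · -- c ≠ '/'
      obtain ⟨hh, tt, hst⟩ := pv_splitOn_exists rest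
      have hsplit : List.splitOn '/' (c :: rest) = (c :: hh) :: tt := by
        rw [pv_splitOn_cons _ hc, hst]
        rfl
      have hF : pvF (c :: rest) = (c :: hh) :: pvFl tt := by
        unfold pvF
        rw [hsplit, pvFl_cons _ (by simp)]
      have hcond : ((c :: rest).getLast? = some '/') ↔ (rest.getLast? = some '/') := by
        cases rest with
        | nil => simp [hc]
        | cons d ds => rw [List.getLast?_cons_cons]
      have ihF' : pvCollA false rest = hh ++ pvJ (pvFl tt)
          ++ (if rest.getLast? = some '/' then ['/'] else []) := by
        rw [ihF, hst, List.headI_cons, List.tail_cons]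
      constructor
      · -- Q, c ≠ '/'
        have hcol : pvCollA true (c :: rest) = c :: pvCollA false rest := by simp [pvCollA, hc]
        rw [hcol, ihF', hF, pvTailJ_cons]
        by_cases hl : rest.getLast? = some '/'
        · rw [if_pos hl, if_pos ⟨hcond.mpr hl, by simp⟩]
          simp
        · rw [if_neg hl, if_neg (fun hx => hl (hcond.mp hx.1))]
          simp
      · -- R, c ≠ '/'
        have hcol : pvCollA false (c :: rest) = c :: pvCollA false rest := by simp [pvCollA, hc]
        rw [hcol, ihF', hsplit, List.headI_cons, List.tail_cons]
        by_cases hl : rest.getLast? = some '/'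
        · rw [if_pos hl, if_pos (hcond.mpr hl)]
          simp
        · rw [if_neg hl, if_neg (fun hx => hl (hcond.mp hx))]
          simp

theorem pv_J_last (ps : List (List Char)) : ∀ a : List Char,
    (∀ p ∈ ps, p ≠ [] ∧ '/' ∉ p) → a.getLast? ≠ some '/' → (a ++ pvJ ps).getLast? ≠ some '/' := by
  induction ps with
  | nil =>
    intro a _ ha
    rw [pvJ_nil, List.append_nil]
    exact ha
  | cons p t ih =>
    intro a hgood ha
    obtain ⟨hne, hns⟩ := hgood p (by simp)
    have h1 : (a ++ ('/' :: p)).getLast? ≠ some '/' := by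
      rw [List.getLast?_append]
      have hcp : ('/' :: p).getLast? = p.getLast? := by
        cases p with
        | nil => exact absurd rfl hne
        | cons q qs => rw [List.getLast?_cons_cons]
      rw [hcp]
      cases hp : p.getLast? with
      | none => exact absurd (List.getLast?_eq_none_iff.mp hp) hne
      | some x =>
        simp only [Option.some_or]
        intro hx
        exact pv_last_ne_slash hne hns (by rw [hp, Option.some_inj.mpr (Option.some_inj.mp hx)])
    have := ih (a ++ ('/' :: p)) (fun q hq => hgood q (by simp [hq])) h1
    simpa [pvJ_cons, List.append_assoc] using this

theorem pv_foldA (ps : List (List Char)) : ∀ a : List Char,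
    (∀ p ∈ ps, p ≠ [] ∧ '/' ∉ p) → a ≠ [] → a.getLast? ≠ some '/' →
    ps.foldl pvPosixJoin a = a ++ pvJ ps := by
  induction ps with
  | nil =>
    intro a _ _ _
    rw [List.foldl_nil, pvJ_nil, List.append_nil]
  | cons p t ih =>
    intro a hgood hane halast
    obtain ⟨hne, hns⟩ := hgood p (by simp)
    have hstart : PySem.Chars.startswith p ['/'] = false := by
      cases p with
      | nil => exact absurd rfl hne
      | cons q qs =>
        have hq : q ≠ '/' := fun h => hns (by simp [h])
        simp [PySem.Chars.startswith, List.isPrefixOf, Ne.symm hq]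
    have hendb : PySem.Chars.endswith a ['/'] = false := by
      rw [Bool.eq_false_iff]
      intro hx
      exact halast ((pv_endswith_slash a).mp hx)
    have hjoin : pvPosixJoin a p = a ++ '/' :: p := by
      simp [pvPosixJoin, hstart, hendb, hane]
    have h1 : (a ++ '/' :: p) ≠ [] := by simp
    have h2 : (a ++ '/' :: p).getLast? ≠ some '/' := by
      rw [List.getLast?_append]
      have hcp : ('/' :: p).getLast? = p.getLast? := by
        cases p with
        | nil => exact absurd rfl hne
        | cons q qs => rw [List.getLast?_cons_cons]
      rw [hcp]
      cases hp : p.getLast? with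
      | none => exact absurd (List.getLast?_eq_none_iff.mp hp) hne
      | some x =>
        simp only [Option.some_or]
        intro hx
        exact pv_last_ne_slash hne hns (by rw [hp, Option.some_inj.mpr (Option.some_inj.mp hx)])
    rw [List.foldl_cons, hjoin, ih (a ++ '/' :: p) (fun q hq => hgood q (by simp [hq])) h1 h2]
    simp [pvJ_cons, List.append_assoc]

-- ===== VERDICT (by name: the statement is the Claim_ definition above) =====
theorem format_abs_path_spec : Claim_equal_format_abs_path := by
  intro path _ hpre
  unfold Spec_format_abs_path
  have hpref : ['/'] <+: path.toList := by
    have hsw : PySem.Chars.startswith path.toList ['/'] = true := by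
      simpa [PySem.Str.startswith] using hpre
    exact (PySem.Chars.startswith_iff _ _).mp hsw
  obtain ⟨cs, hcs⟩ := hpref
  have hsplit : List.splitOn '/' path.toList = [] :: List.splitOn '/' cs := by
    rw [← hcs]
    exact pv_splitOn_cons_slash cs
  -- A's fold over the filtered parts
  have hAfold : (pvF cs).foldl pvPosixJoin ['/'] = (if pvF cs = [] then ['/'] else pvJ (pvF cs)) := by
    by_cases hFe : pvF cs = []
    · rw [hFe, if_pos rfl, List.foldl_nil]
    · obtain ⟨p, t, hpt⟩ : ∃ p t, pvF cs = p :: t := by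
        rcases hx : pvF cs with _ | ⟨p, t⟩
        · exact absurd hx hFe
        · exact ⟨p, t, rfl⟩
      obtain ⟨hne, hns⟩ := pv_good cs p (by simp [hpt])
      have hstart : PySem.Chars.startswith p ['/'] = false := by
        cases p with
        | nil => exact absurd rfl hne
        | cons q qs =>
          have hq : q ≠ '/' := fun h => hns (by simp [h])
          simp [PySem.Chars.startswith, List.isPrefixOf, Ne.symm hq]
      have hjoin1 : pvPosixJoin ['/'] p = '/' :: p := by
        have he : PySem.Chars.endswith ['/'] ['/'] = true := by decide
        simp [pvPosixJoin, hstart, he]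
      have hlastp : ('/' :: p).getLast? ≠ some '/' := by
        have hcp : ('/' :: p).getLast? = p.getLast? := by
          cases p with
          | nil => exact absurd rfl hne
          | cons q qs => rw [List.getLast?_cons_cons]
        rw [hcp]
        exact pv_last_ne_slash hne hns
      rw [hpt, List.foldl_cons, hjoin1,
        pv_foldA t ('/' :: p) (fun q hq => (pv_good cs q (by simp [hpt, hq]))) (by simp) hlastp,
        if_neg (List.cons_ne_nil _ _), pvJ_cons]
      rfl
  -- B's scan
  have hBfold : path.toList.foldl pvStepB [] = '/' :: pvCollA true cs := by
    rw [← hcs]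
    have hstep : pvStepB [] '/' = ['/'] := by simp [pvStepB, PySem.Chars.endswith]
    rw [List.cons_append, List.nil_append, List.foldl_cons, hstep, pv_foldB]
    simp
  have hQ := (pv_QR cs).1
  simp only [format_abs_path, format_abs_path_alt]
  rw [pv_splitOn_eq, hsplit]
  have hfl : ∀ ts : List (List Char), ts.filter (fun p => p ≠ []) = pvFl ts := fun _ => rfl
  rw [hfl, pvFl_nil_cons]
  have hFl2 : pvFl (List.splitOn '/' cs) = pvF cs := rfl
  rw [hFl2, hAfold, hBfold, hQ]
  by_cases hFe : pvF cs = []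
  · rw [hFe, if_pos rfl, pvTailJ_nil,
      if_neg (show ¬(cs.getLast? = some '/' ∧ ([] : List (List Char)) ≠ []) from by simp)]
    simp
  · obtain ⟨p, t, hpt⟩ : ∃ p t, pvF cs = p :: t := by
      rcases hx : pvF cs with _ | ⟨p, t⟩
      · exact absurd hx hFe
      · exact ⟨p, t, rfl⟩
    obtain ⟨hne, hns⟩ := pv_good cs p (by simp [hpt])
    have hJlast : ('/' :: (p ++ pvJ t)).getLast? ≠ some '/' := by
      have hstep := pv_J_last t ('/' :: p) (fun q hq => pv_good cs q (by simp [hpt, hq]))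
        (by
          have hcp : ('/' :: p).getLast? = p.getLast? := by
            cases p with
            | nil => exact absurd rfl hne
            | cons q qs => rw [List.getLast?_cons_cons]
          rw [hcp]
          exact pv_last_ne_slash hne hns)
      simpa using hstep
    rw [if_neg hFe, hpt, pvJ_cons, pvTailJ_cons]
    by_cases hl : cs.getLast? = some '/'
    · have hin : (if cs.getLast? = some '/' ∧ (p :: t : List (List Char)) ≠ [] then (['/'] : List Char) else [])
          = ['/'] := if_pos ⟨hl, by simp⟩
      rw [hin]
      have hsh : '/' :: ((p ++ pvJ t) ++ ['/']) = ('/' :: (p ++ pvJ t)) ++ ['/'] := rfl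
      rw [hsh]
      have hcond2 : 1 < (('/' :: (p ++ pvJ t)) ++ ['/']).length
          ∧ PySem.Chars.endswith (('/' :: (p ++ pvJ t)) ++ ['/']) ['/'] = true :=
        ⟨by simp, (pv_endswith_slash _).mpr (by rw [List.getLast?_append]; rfl)⟩
      rw [if_pos hcond2, List.dropLast_concat]
    · have hin : (if cs.getLast? = some '/' ∧ (p :: t : List (List Char)) ≠ [] then (['/'] : List Char) else [])
          = [] := if_neg (fun hx => hl hx.1)
      rw [hin, List.append_nil]
      have hcond2 : ¬(1 < ('/' :: (p ++ pvJ t)).length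
          ∧ PySem.Chars.endswith ('/' :: (p ++ pvJ t)) ['/'] = true) := by
        rintro ⟨-, hend⟩
        exact hJlast ((pv_endswith_slash _).mp hend)
      rw [if_neg hcond2]
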